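-- pv_equiv track=rewrite | github.com/carlossulba/Jump-Sturdy | JumpSturdy/ai/evolved_player.py | piece_is_last
-- ===== SOURCE A (Python) =====
-- def piece_is_last(weights, friendly_singles, friendly_doubles, enemy_singles, enemy_doubles):
--     # Find the furthest front/back friendly/enemy piece
--     most_advanced_single_row = 0
--     most_advanced_double_row = 0
--     less_advanced_single_row = 8
--     less_advanced_double_row = 8
--
--     for row in range(7, -1, -1):
--         if '1' in friendly_singles[row * 8:(row + 1) * 8]:
--             most_advanced_single_row = row
--             type = "singles"
--             break
--     for row in range(7, -1, -1):
--         if '1' in friendly_doubles[row * 8:(row + 1) * 8]: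
--             most_advanced_double_row = row
--             type = "doubles"
--             break
--     for row in range(7, -1, -1):
--         if '1' in enemy_singles[row * 8:(row + 1) * 8]:
--             less_advanced_single_row = row
--             break
--     for row in range(7, -1, -1):
--         if '1' in enemy_doubles[row * 8:(row + 1) * 8]:
--             less_advanced_double_row = row
--             break
--
--     friend = max(most_advanced_single_row, most_advanced_double_row)
--     enemy = min(less_advanced_single_row, less_advanced_double_row)
--
--     # Check if any friendly piece is beyond the furthest enemy piece
--     if friend > enemy:
--         return weights[f"friendly_{type}_value"] + friend
--     return 0
-- ===== SOURCE B (Python) =====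
-- def piece_is_last(weights, friendly_singles, friendly_doubles, enemy_singles, enemy_doubles):
--     # Single forward pass over the 64 board cells with accumulators, instead of
--     # four separate descending row-slice scans.
--     friend = 0
--     has_doubles = False
--     es_top = None
--     ed_top = None
--     for i in range(64):
--         row = i // 8
--         if i < len(friendly_singles) and friendly_singles[i] == '1':
--             friend = max(friend, row)
--         if i < len(friendly_doubles) and friendly_doubles[i] == '1':
--             friend = max(friend, row)
--             has_doubles = True
--         if i < len(enemy_singles) and enemy_singles[i] == '1':
--             es_top = row
--         if i < len(enemy_doubles) and enemy_doubles[i] == '1':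
--             ed_top = row
--     enemy = min(8 if es_top is None else es_top, 8 if ed_top is None else ed_top)
--     if friend > enemy:
--         kind = "doubles" if has_doubles else "singles"
--         return weights[f"friendly_{kind}_value"] + friend
--     return 0
-- ===== Notes on version B (the rewrite author's own statement) =====
-- stated objective: alternative
-- what changed: Replaces A's four independent descending row-by-row slice scans (each breaking at the first occupied row) by a single forward pass over the 64 cell indices that maintains accumulators (running max friendly row, a doubles-seen flag, and last-seen enemy rows), deriving the weight key from the flag instead of loop-carried last-write state.
import Mathlib
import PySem

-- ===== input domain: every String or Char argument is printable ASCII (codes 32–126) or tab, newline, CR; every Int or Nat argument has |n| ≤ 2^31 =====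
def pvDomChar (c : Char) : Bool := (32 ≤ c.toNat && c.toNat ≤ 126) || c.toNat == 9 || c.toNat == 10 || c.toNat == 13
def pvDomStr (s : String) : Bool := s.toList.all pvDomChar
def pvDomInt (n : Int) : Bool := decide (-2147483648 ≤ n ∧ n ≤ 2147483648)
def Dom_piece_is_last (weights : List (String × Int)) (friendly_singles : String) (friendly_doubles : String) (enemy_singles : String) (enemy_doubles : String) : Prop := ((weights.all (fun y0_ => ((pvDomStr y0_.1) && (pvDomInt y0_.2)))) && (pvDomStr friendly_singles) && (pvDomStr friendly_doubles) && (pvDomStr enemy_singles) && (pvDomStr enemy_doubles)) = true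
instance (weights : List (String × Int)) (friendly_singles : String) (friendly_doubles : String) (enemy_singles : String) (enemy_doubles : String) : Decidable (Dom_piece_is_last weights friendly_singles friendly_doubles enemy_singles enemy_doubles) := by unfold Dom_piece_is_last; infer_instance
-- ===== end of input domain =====

-- ===== PORT A =====
-- B replaces A's four descending row-slice scans by ONE forward pass over the 64 cell indices
-- with accumulators (alternative decomposition; same asymptotic cost).
-- A-side helper: one Python loop "for row in range(7,-1,-1): if '1' in s[row*8:(row+1)*8]: …; break"
def pyLastRow (s : String) : Option Int :=
  (PySem.List.pyRange 7 (-1) (-1)).find? (fun row =>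
    PySem.Str.isIn "1" (PySem.Str.slice s (some (row * 8)) (some ((row + 1) * 8))))

def piece_is_last (weights : List (String × Int)) (friendly_singles : String) (friendly_doubles : String) (enemy_singles : String) (enemy_doubles : String) : Int :=
  let fsr := pyLastRow friendly_singles
  let most_advanced_single_row : Int := fsr.getD 0
  let type1 : Option String := if fsr.isSome then some "singles" else none
  let fdr := pyLastRow friendly_doubles
  let most_advanced_double_row : Int := fdr.getD 0
  let type2 : Option String := if fdr.isSome then some "doubles" else type1
  let less_advanced_single_row : Int := (pyLastRow enemy_singles).getD 8
  let less_advanced_double_row : Int := (pyLastRow enemy_doubles).getD 8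
  let friend := max most_advanced_single_row most_advanced_double_row
  let enemy := min less_advanced_single_row less_advanced_double_row
  if friend > enemy then
    -- weights[f"friendly_{type}_value"] + friend; a missing key raises KeyError in Python
    -- (excluded by Pre_), and `type` is provably bound when this branch is reached, so the
    -- totalising defaults `.getD 0` / `.getD "singles"` are never observed inside Pre_.
    ((PySem.Dict.mk weights).get? ("friendly_" ++ type2.getD "singles" ++ "_value")).getD 0 + friend
  else 0

-- ===== PORT B =====
-- B-side helper: the body of B's single "for i in range(64)" loop (state: friend, has_doubles, es_top, ed_top)
def pvStepB (fs fd es ed : String) (st : Int × Bool × Option Int × Option Int) (i : Int) :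
    Int × Bool × Option Int × Option Int :=
  let row := PySem.Int.floordiv i 8
  let friend := if PySem.Str.pyGet? fs i = some '1' then max st.1 row else st.1
  let friend := if PySem.Str.pyGet? fd i = some '1' then max friend row else friend
  let has_doubles := if PySem.Str.pyGet? fd i = some '1' then true else st.2.1
  let es_top := if PySem.Str.pyGet? es i = some '1' then some row else st.2.2.1
  let ed_top := if PySem.Str.pyGet? ed i = some '1' then some row else st.2.2.2
  (friend, has_doubles, es_top, ed_top)

def piece_is_last_alt (weights : List (String × Int)) (friendly_singles : String) (friendly_doubles : String) (enemy_singles : String) (enemy_doubles : String) : Int :=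
  let st := (PySem.List.pyRange 0 64 1).foldl
      (pvStepB friendly_singles friendly_doubles enemy_singles enemy_doubles)
      (0, false, none, none)
  let friend := st.1
  let enemy := min (st.2.2.1.getD 8) (st.2.2.2.getD 8)
  if friend > enemy then
    -- weights[f"friendly_{kind}_value"] + friend; missing key = KeyError, excluded by Pre_
    ((PySem.Dict.mk weights).get?
        ("friendly_" ++ (if st.2.1 then "doubles" else "singles") ++ "_value")).getD 0 + friend
  else 0

-- ===== PRECONDITION & SPEC =====
-- Readable restatement of "row r of the first 64 board cells holds a piece" (used only by Pre_).
def pvRowHasOne (s : String) (r : Nat) : Bool := decide ('1' ∈ (s.toList.drop (8 * r)).take 8)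
-- Highest piece row of a board (rows 0..7), or the default d when the board is empty.
def pvTopRowPre (s : String) (d : Int) : Int :=
  match ((List.range 8).filter (pvRowHasOne s)).max? with
  | some r => (r : Int)
  | none => d
-- Pre_ excludes exactly the inputs on which Python's A raises KeyError: those where a friendly piece
-- sits strictly beyond every enemy piece but the needed weight key is missing (B raises there too).
def Pre_piece_is_last (weights : List (String × Int)) (friendly_singles : String) (friendly_doubles : String) (enemy_singles : String) (enemy_doubles : String) : Prop :=
  min (pvTopRowPre enemy_singles 8) (pvTopRowPre enemy_doubles 8)
      < max (pvTopRowPre friendly_singles 0) (pvTopRowPre friendly_doubles 0) →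
    (if (List.range 8).any (pvRowHasOne friendly_doubles)
     then "friendly_doubles_value" else "friendly_singles_value") ∈ weights.map Prod.fst
instance (weights : List (String × Int)) (friendly_singles : String) (friendly_doubles : String) (enemy_singles : String) (enemy_doubles : String) : Decidable (Pre_piece_is_last weights friendly_singles friendly_doubles enemy_singles enemy_doubles) := by unfold Pre_piece_is_last; infer_instance

def pvWitness_piece_is_last : (List (String × Int)) × String × String × String × String :=
  ([("friendly_singles_value", 3)], "10000000", "", "", "00000000100000000")

def Spec_piece_is_last (weights : List (String × Int)) (friendly_singles : String) (friendly_doubles : String) (enemy_singles : String) (enemy_doubles : String) (out : Int) : Prop := out = piece_is_last_alt weights friendly_singles friendly_doubles enemy_singles enemy_doubles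
instance (weights : List (String × Int)) (friendly_singles : String) (friendly_doubles : String) (enemy_singles : String) (enemy_doubles : String) (out : Int) : Decidable (Spec_piece_is_last weights friendly_singles friendly_doubles enemy_singles enemy_doubles out) := by unfold Spec_piece_is_last; infer_instance

-- ===== CLAIM (what is proved, stated in full; the proofs are below) =====
def Claim_equal_piece_is_last : Prop := ∀ (weights : List (String × Int)) (friendly_singles : String) (friendly_doubles : String) (enemy_singles : String) (enemy_doubles : String), Dom_piece_is_last weights friendly_singles friendly_doubles enemy_singles enemy_doubles → Pre_piece_is_last weights friendly_singles friendly_doubles enemy_singles enemy_doubles → Spec_piece_is_last weights friendly_singles friendly_doubles enemy_singles enemy_doubles (piece_is_last weights friendly_singles friendly_doubles enemy_singles enemy_doubles)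

-- ===== LEMMAS AND PROOFS =====

-- index of the LAST '1' among the first m characters (proof-side characterisation)
def pvLastOne (l : List Char) : Nat → Option Nat
  | 0 => none
  | m + 1 => if l[m]? = some '1' then some m else pvLastOne l m

-- its row (index // 8) as an Int, with default d when absent
def pvRowD (l : List Char) (m : Nat) (d : Int) : Int :=
  ((pvLastOne l m).map (fun j => ((j / 8 : Nat) : Int))).getD d

lemma pvLastOne_none_iff (l : List Char) (m : Nat) :
    pvLastOne l m = none ↔ ∀ i < m, l[i]? ≠ some '1' := by
  induction m with
  | zero => simp [pvLastOne]
  | succ k ih =>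
    simp only [pvLastOne]
    split_ifs with h
    · constructor
      · intro hc; exact absurd hc (by simp)
      · intro hall; exact absurd h (hall k (by omega))
    · rw [ih]
      constructor
      · intro hall i hi
        rcases Nat.lt_succ_iff_lt_or_eq.mp hi with h1 | h1
        · exact hall i h1
        · subst h1; exact h
      · intro hall i hi; exact hall i (by omega)

lemma pvLastOne_some (l : List Char) (m j : Nat) (h : pvLastOne l m = some j) :
    j < m ∧ l[j]? = some '1' ∧ ∀ i, j < i → i < m → l[i]? ≠ some '1' := by
  induction m with
  | zero => simp [pvLastOne] at h
  | succ k ih =>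
    simp only [pvLastOne] at h
    split_ifs at h with h1
    · cases h
      exact ⟨by omega, h1, fun i hi1 hi2 _ => by omega⟩
    · obtain ⟨ha, hb, hc⟩ := ih h
      refine ⟨by omega, hb, fun i hi1 hi2 => ?_⟩
      rcases Nat.lt_succ_iff_lt_or_eq.mp hi2 with h2 | h2
      · exact hc i hi1 h2
      · subst h2; exact h1

lemma pv_row_mem_iff (l : List Char) (a : Nat) (c : Char) :
    c ∈ (l.drop a).take 8 ↔ ∃ i, a ≤ i ∧ i < a + 8 ∧ l[i]? = some c := by
  rw [List.mem_iff_getElem?]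
  constructor
  · rintro ⟨t, ht⟩
    rw [List.getElem?_take] at ht
    by_cases h8 : t < 8
    · rw [if_pos h8, List.getElem?_drop] at ht
      exact ⟨a + t, by omega, by omega, ht⟩
    · rw [if_neg h8] at ht; exact absurd ht (by simp)
  · rintro ⟨i, h1, h2, h3⟩
    refine ⟨i - a, ?_⟩
    rw [List.getElem?_take, if_pos (by omega), List.getElem?_drop,
      show a + (i - a) = i by omega]
    exact h3

lemma pv_isIn_one_iff (x : List Char) : PySem.Chars.isIn ['1'] x = true ↔ '1' ∈ x := by
  rw [PySem.Chars.isIn_iff_infix, List.singleton_infix_iff]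

-- A's per-row test, as an index statement about the underlying character list
lemma pv_pred_iff (s : String) (n : Nat) :
    PySem.Str.isIn "1" (PySem.Str.slice s (some ((n : Int) * 8)) (some (((n : Int) + 1) * 8))) = true
      ↔ ∃ i, 8 * n ≤ i ∧ i < 8 * n + 8 ∧ s.toList[i]? = some '1' := by
  have ha : (n : Int) * 8 = ((n * 8 : Nat) : Int) := by push_cast; ring
  have hb : ((n : Int) + 1) * 8 = ((n * 8 + 8 : Nat) : Int) := by push_cast; ring
  rw [ha, hb]
  rw [PySem.Str.isIn_eq, PySem.Str.toList_slice, PySem.Chars.slice_eq_listSlice,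
    PySem.List.slice_natCast, show n * 8 + 8 - n * 8 = 8 by omega,
    show "1".toList = ['1'] from rfl, pv_isIn_one_iff,
    pv_row_mem_iff s.toList (n * 8) '1']
  constructor
  · rintro ⟨i, h1, h2, h3⟩; exact ⟨i, by omega, by omega, h3⟩
  · rintro ⟨i, h1, h2, h3⟩; exact ⟨i, by omega, by omega, h3⟩

-- find? over the literal descending row range [m-1, …, 0]
lemma pv_find_desc (p : Int → Bool) (m : Nat) (r : Nat) (hr : r < m)
    (hT : p (r : Int) = true) (hF : ∀ n : Nat, r < n → n < m → p (n : Int) = false) :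
    (PySem.List.pyRange ((m : Int) - 1) (-1) (-1)).find? p = some (r : Int) := by
  induction m with
  | zero => omega
  | succ m ih =>
    rw [PySem.List.pyRange_neg_one_cons (by omega)]
    rw [List.find?_cons]
    have hhead : ((m + 1 : Nat) : Int) - 1 = ((m : Nat) : Int) := by push_cast; ring
    rcases Nat.lt_or_ge r m with h | h
    · have hf : p (((m : Nat) : Int)) = false := hF m h (by omega)
      rw [hhead, hf]
      have := ih h (fun n hn1 hn2 => hF n hn1 (by omega))
      simpa using this
    · have hrm : r = m := by omega
      subst hrm
      rw [hhead, hT]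

lemma pv_find_none (p : Int → Bool) (hF : ∀ n : Nat, n < 8 → p (n : Int) = false) :
    (PySem.List.pyRange 7 (-1) (-1)).find? p = none := by
  rw [List.find?_eq_none]
  intro x hx
  rw [PySem.List.mem_pyRange_neg_one] at hx
  obtain ⟨n, rfl⟩ : ∃ n : Nat, x = (n : Int) := ⟨x.toNat, by omega⟩
  have : p (n : Int) = false := hF n (by omega)
  simp [this]

-- CENTRAL LEMMA (A side): the descending row scan equals last-'1'-index-over-64 divided by 8
lemma pv_key (s : String) :
    pyLastRow s = (pvLastOne s.toList 64).map (fun j => ((j / 8 : Nat) : Int)) := by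
  unfold pyLastRow
  cases hL : pvLastOne s.toList 64 with
  | none =>
    rw [pvLastOne_none_iff] at hL
    rw [Option.map_none]
    apply pv_find_none
    intro n hn
    rw [Bool.eq_false_iff]
    intro hp
    obtain ⟨i, h1, h2, h3⟩ := (pv_pred_iff s n).mp hp
    exact hL i (by omega) h3
  | some j =>
    obtain ⟨hj64, hjc, hmax⟩ := pvLastOne_some s.toList 64 j hL
    rw [Option.map_some]
    have h8 : (7 : Int) = ((8 : Nat) : Int) - 1 := by norm_num
    rw [h8]
    apply pv_find_desc _ 8 (j / 8) (by omega)
    · rw [pv_pred_iff s (j / 8)]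
      have h1 := Nat.div_add_mod j 8
      have h2 := Nat.mod_lt j (show 0 < 8 by norm_num)
      exact ⟨j, by omega, by omega, hjc⟩
    · intro n hrn hn8
      rw [Bool.eq_false_iff]
      intro hp
      obtain ⟨i, h1, h2, h3⟩ := (pv_pred_iff s n).mp hp
      have hji : j < i := by
        have := Nat.div_add_mod j 8
        have h2' := Nat.mod_lt j (show 0 < 8 by norm_num)
        omega
      exact hmax i hji (by omega) h3

lemma pvLastOne_succ (l : List Char) (m : Nat) :
    pvLastOne l (m + 1) = if l[m]? = some '1' then some m else pvLastOne l m := rfl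

lemma pvRowD_le (l : List Char) (m : Nat) : pvRowD l m 0 ≤ ((m / 8 : Nat) : Int) := by
  unfold pvRowD
  cases hL : pvLastOne l m with
  | none =>
    simp only [Option.map_none, Option.getD_none]
    positivity
  | some j =>
    obtain ⟨hj, _, _⟩ := pvLastOne_some l m j hL
    simp only [Option.map_some, Option.getD_some]
    exact_mod_cast Nat.div_le_div_right (le_of_lt hj)

lemma pvRowD_nonneg (l : List Char) (m : Nat) : 0 ≤ pvRowD l m 0 := by
  unfold pvRowD
  cases pvLastOne l m with
  | none => simp
  | some j =>
    simp only [Option.map_some, Option.getD_some]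
    positivity

lemma pvRowD_succ (l : List Char) (m : Nat) :
    pvRowD l (m + 1) 0 = if l[m]? = some '1' then (((m / 8 : Nat)) : Int) else pvRowD l m 0 := by
  unfold pvRowD
  rw [pvLastOne_succ]
  split_ifs with h <;> simp

-- CENTRAL LEMMA (B side): invariant of the single forward pass
lemma pv_fold_inv (fs fd es ed : String) (m : Nat) :
    (PySem.List.pyRange 0 (m : Int) 1).foldl (pvStepB fs fd es ed) (0, false, none, none) =
      (max (pvRowD fs.toList m 0) (pvRowD fd.toList m 0),
       (pvLastOne fd.toList m).isSome,
       (pvLastOne es.toList m).map (fun j => ((j / 8 : Nat) : Int)),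
       (pvLastOne ed.toList m).map (fun j => ((j / 8 : Nat) : Int))) := by
  induction m with
  | zero =>
    rw [show ((0 : Nat) : Int) = 0 by norm_num, PySem.List.pyRange_one_eq_nil le_rfl]
    simp [pvLastOne, pvRowD]
  | succ m ih =>
    have hsplit : PySem.List.pyRange 0 ((m + 1 : Nat) : Int) 1
        = PySem.List.pyRange 0 (m : Int) 1 ++ [(m : Int)] := by
      rw [show ((m + 1 : Nat) : Int) = (m : Int) + 1 by push_cast; ring]
      exact PySem.List.pyRange_one_succ_right (by positivity)
    rw [hsplit, List.foldl_append, ih, List.foldl_cons, List.foldl_nil]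
    have hfd : PySem.Int.floordiv ((m : Nat) : Int) 8 = ((m / 8 : Nat) : Int) := by
      exact_mod_cast PySem.Int.floordiv_natCast m 8
    have hfsle := pvRowD_le fs.toList m
    have hfdle := pvRowD_le fd.toList m
    have hfs0 := pvRowD_nonneg fs.toList m
    have hfd0 := pvRowD_nonneg fd.toList m
    rw [pvRowD_succ fs.toList m, pvRowD_succ fd.toList m, pvLastOne_succ fd.toList m,
      pvLastOne_succ es.toList m, pvLastOne_succ ed.toList m]
    simp only [pvStepB, PySem.Str.pyGet?_natCast, hfd, Prod.mk.injEq]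
    refine ⟨?_, ?_, ?_, ?_⟩
    · split_ifs <;> omega
    · split_ifs <;> simp
    · split_ifs <;> simp
    · split_ifs <;> simp

-- ===== VERDICT (by name: the statement is the Claim_ definition above) =====
set_option maxHeartbeats 1000000 in
theorem piece_is_last_spec : Claim_equal_piece_is_last := by
  unfold Claim_equal_piece_is_last
  intro weights fs fd es ed _ _
  unfold Spec_piece_is_last piece_is_last piece_is_last_alt
  rw [show (64 : Int) = ((64 : Nat) : Int) by norm_num, pv_fold_inv,
    pv_key fs, pv_key fd, pv_key es, pv_key ed]
  simp only [pvRowD]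
  cases hfd : pvLastOne fd.toList 64 with
  | none =>
    cases hfs : pvLastOne fs.toList 64 with
    | none => simp
    | some j => simp
  | some j => simp
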